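-- pv_equiv track=rewrite | github.com/takecian/ProgrammingStudyLog | algoexpert/airport_connections.py | airportConnections
-- ===== SOURCE A (Python) =====
-- from collections import defaultdict
--
-- def airportConnections(airports, routes, startingAirport):
--     # Write your code here.
--     airport_num = len(airports)
--     edges = defaultdict(list)
--     group = defaultdict(lambda: None)
--     for start, goal in routes:
--         edges[start].append(goal)
--
--     requird_route_count = 0
--
--     for airport in airports:
--         if group[airport] is not None:
--             continue
--
--         group[airport] = requird_route_count
--         stack = [airport]
--         visited = set()
--         while stack:
--             ap = stack.pop()
--             visited.add(ap)
--             for next_ap in edges[ap]: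
--                 if next_ap not in visited:
--                     group[next_ap] = requird_route_count
--                     stack.append(next_ap)
--
--         requird_route_count += 1
--
--     return requird_route_count
-- ===== SOURCE B (Python) =====
-- def airportConnections(airports, routes, startingAirport):
--     adj = {}
--     for start, goal in routes:
--         adj.setdefault(start, []).append(goal)
--     covered = set()
--     count = 0
--     for airport in airports:
--         if airport in covered:
--             continue
--         count += 1
--         covered.add(airport)
--         frontier = {airport}
--         while frontier:
--             nxt = set()
--             for u in frontier:
--                 for v in adj.get(u, []):
--                     if v not in covered:
--                         covered.add(v)
--                         nxt.add(v)
--             frontier = nxt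
--     return count
-- ===== Notes on version B (the rewrite author's own statement) =====
-- stated objective: faster
-- what changed: A restarts a per-root stack DFS with a fresh visited set from every ungrouped airport, re-walking already-grouped regions; B does a level-synchronous frontier BFS (whole frontier sets expanded at once, no stack) pruned by one global covered set, so every edge is scanned at most once overall.
import Mathlib
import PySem

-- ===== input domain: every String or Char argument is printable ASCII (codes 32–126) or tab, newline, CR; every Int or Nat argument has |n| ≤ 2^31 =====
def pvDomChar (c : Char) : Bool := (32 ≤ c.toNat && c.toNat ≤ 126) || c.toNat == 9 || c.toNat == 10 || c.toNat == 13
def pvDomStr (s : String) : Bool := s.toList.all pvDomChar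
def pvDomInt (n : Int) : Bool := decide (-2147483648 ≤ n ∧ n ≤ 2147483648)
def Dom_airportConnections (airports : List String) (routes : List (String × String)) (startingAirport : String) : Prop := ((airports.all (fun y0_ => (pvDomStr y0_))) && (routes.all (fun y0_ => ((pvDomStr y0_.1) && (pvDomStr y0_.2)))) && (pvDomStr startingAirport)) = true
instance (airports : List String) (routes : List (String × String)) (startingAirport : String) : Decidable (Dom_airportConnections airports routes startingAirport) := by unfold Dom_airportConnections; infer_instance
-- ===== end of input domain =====

-- B replaces A's per-root stack DFS with a fresh visited set per run by a level-synchronous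
-- frontier BFS (no stack) pruned by one global covered set: objective 'faster'.

-- ===== PORT A =====
-- termination helpers for the while-loops (cited by the ports' decreasing_by)
theorem pvFilterLenMono {α : Type} (l : List α) (p q : α → Bool)
    (h : ∀ x ∈ l, q x = true → p x = true) :
    (l.filter q).length ≤ (l.filter p).length := by
  induction l with
  | nil => simp
  | cons a t ih =>
    have ht := ih (fun x hx => h x (List.mem_cons_of_mem _ hx))
    by_cases hq : q a
    · have hp := h a (by simp) hq
      simp [hq, hp]; omega
    · by_cases hp : p a <;> simp [hq, hp] <;> omega

theorem pvFilterLenStrict {α : Type} (l : List α) (p q : α → Bool)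
    (h : ∀ x ∈ l, q x = true → p x = true)
    (x : α) (hx : x ∈ l) (hpx : p x = true) (hqx : ¬ q x = true) :
    (l.filter q).length < (l.filter p).length := by
  induction l with
  | nil => simp at hx
  | cons a t ih =>
    have hle : (t.filter q).length ≤ (t.filter p).length :=
      pvFilterLenMono t p q (fun y hy => h y (List.mem_cons_of_mem _ hy))
    rcases List.mem_cons.1 hx with rfl | hxt
    · simp [hpx, Bool.eq_false_iff.2 hqx]; omega
    · have hlt := ih (fun y hy => h y (List.mem_cons_of_mem _ hy)) hxt
      by_cases hq : q a
      · have hp := h a (by simp) hq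
        simp [hq, hp]; omega
      · by_cases hp : p a <;> simp [hq, hp] <;> omega

def pvU (edges : PySem.Dict String (List String)) : List String :=
  edges.items.flatMap (fun kv => kv.1 :: kv.2)

def pvUn (edges : PySem.Dict String (List String)) (visited : List String) : Nat :=
  ((pvU edges).filter (fun v => !(PySem.Set.contains visited v))).length

def pvT (edges : PySem.Dict String (List String)) (visited : List String) (stack : List String) : Nat :=
  match stack with
  | [] => 0
  | h :: _ => if (pvU edges).contains h && !(PySem.Set.contains visited h) then 0 else 1

theorem pvT_le_one (e : PySem.Dict String (List String)) (v s : List String) : pvT e v s ≤ 1 := by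
  cases s with
  | nil => simp [pvT]
  | cons h t => simp only [pvT]; split <;> omega

-- every neighbour list member, and its key, lies in pvU
theorem pvMemU_val (edges : PySem.Dict String (List String)) (ap w : String)
    (hw : w ∈ edges.getD ap []) : w ∈ pvU edges := by
  cases h : edges.get? ap with
  | none => rw [PySem.Dict.getD_of_get?_eq_none _ _ h] at hw; simp at hw
  | some l =>
    rw [PySem.Dict.getD_eq_get?_getD, h] at hw; simp only [Option.getD_some] at hw
    exact List.mem_flatMap.2 ⟨(ap, l), PySem.Dict.mem_items_of_get?_eq_some _ h, by simp [hw]⟩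

theorem pvMemU_key (edges : PySem.Dict String (List String)) (ap w : String)
    (hw : w ∈ edges.getD ap []) : ap ∈ pvU edges := by
  cases h : edges.get? ap with
  | none => rw [PySem.Dict.getD_of_get?_eq_none _ _ h] at hw; simp at hw
  | some l =>
    exact List.mem_flatMap.2 ⟨(ap, l), PySem.Dict.mem_items_of_get?_eq_some _ h, by simp⟩

theorem pvContains_false {α : Type} [BEq α] [LawfulBEq α] (s : PySem.Set α) (x : α) :
    PySem.Set.contains s x = false ↔ x ∉ s := by
  rw [Bool.eq_false_iff]
  constructor
  · exact fun h hm => h ((PySem.Set.contains_iff s x).2 hm)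
  · exact fun h hc => h ((PySem.Set.contains_iff s x).1 hc)

theorem pvUn_add_eq_of_not_memU (edges : PySem.Dict String (List String))
    (visited : PySem.Set String) (ap : String) (hU : ap ∉ pvU edges) :
    pvUn edges (PySem.Set.add visited ap) = pvUn edges visited := by
  unfold pvUn
  congr 1
  apply List.filter_congr
  intro v hv
  have hne : v ≠ ap := fun e => hU (e ▸ hv)
  have : v ∈ PySem.Set.add visited ap ↔ v ∈ visited := by
    rw [PySem.Set.mem_add]
    exact ⟨fun h => h.resolve_right hne, Or.inl⟩
  by_cases hvv : v ∈ visited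
  · rw [(PySem.Set.contains_iff _ _).2 hvv, (PySem.Set.contains_iff _ _).2 (this.2 hvv)]
  · rw [(pvContains_false _ _).2 hvv, (pvContains_false _ _).2 (fun h => hvv (this.1 h))]

theorem pvGetD_nil_of_not_memU (edges : PySem.Dict String (List String)) (ap : String)
    (hU : ap ∉ pvU edges) : edges.getD ap [] = [] := by
  by_contra hne
  rcases List.exists_mem_of_ne_nil _ hne with ⟨w, hw⟩
  exact hU (pvMemU_key edges ap w hw)

theorem pvUn_add_lt (edges : PySem.Dict String (List String)) (visited : PySem.Set String)
    (ap : String) (hU : ap ∈ pvU edges) (hv : ap ∉ visited) :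
    pvUn edges (PySem.Set.add visited ap) < pvUn edges visited := by
  apply pvFilterLenStrict _ _ _ _ ap hU
  · rw [Bool.not_eq_true', pvContains_false]; exact hv
  · intro h
    rw [Bool.not_eq_true', pvContains_false] at h
    exact h ((PySem.Set.mem_add visited ap ap).2 (Or.inr rfl))
  · intro x _ hx
    rw [Bool.not_eq_true', pvContains_false] at hx ⊢
    exact fun hm => hx ((PySem.Set.mem_add visited ap x).2 (Or.inl hm))

-- lexicographic tail step used twice in A's termination argument
theorem pvLexTail (e : PySem.Dict String (List String)) (vis s : List String) (n : Nat)
    (hn : s.length < n) :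
    Prod.Lex (fun a₁ a₂ : Nat => a₁ < a₂) (fun a₁ a₂ : Nat => a₁ < a₂) (pvT e vis s, s.length) (1, n) := by
  rcases Nat.lt_or_ge (pvT e vis s) 1 with h | h
  · exact Prod.Lex.left _ _ h
  · have heq : pvT e vis s = 1 := le_antisymm (pvT_le_one _ _ _) h
    rw [heq]
    exact Prod.Lex.right _ hn

-- edges = defaultdict(list); for start, goal in routes: edges[start].append(goal)
def pvEdgesA (routes : List (String × String)) : PySem.Dict String (List String) :=
  routes.foldl (fun d r => d.modify r.1 [] (· ++ [r.2])) PySem.Dict.empty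

-- A's 'while stack:' loop; list head = Python stack top; group[v] is None ≡ key v absent
def pvDfsA (edges : PySem.Dict String (List String)) (c : Int)
    (stack : List String) (visited : PySem.Set String) (group : PySem.Dict String Int) :
    PySem.Dict String Int :=
  match stack with
  | [] => group
  | ap :: rest =>
    pvDfsA edges c
      (((edges.getD ap []).filter
          (fun w => !(PySem.Set.contains (PySem.Set.add visited ap) w))).reverse ++ rest)
      (PySem.Set.add visited ap)
      (((edges.getD ap []).filter
          (fun w => !(PySem.Set.contains (PySem.Set.add visited ap) w))).foldl
        (fun g w => g.insert w c) group)
termination_by (pvUn edges visited, pvT edges visited stack, stack.length)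
decreasing_by
  by_cases hv : ap ∈ visited
  · have hadd : PySem.Set.add visited ap = visited := PySem.Set.add_of_mem hv
    rw [hadd]
    have ht : pvT edges visited (ap :: rest) = 1 := by
      simp only [pvT]
      rw [if_neg]
      rw [(PySem.Set.contains_iff visited ap).2 hv]
      simp
    rw [ht]
    cases hrev : ((edges.getD ap []).filter (fun w => !(PySem.Set.contains visited w))).reverse with
    | nil =>
      simp only [List.nil_append]
      exact Prod.Lex.right _ (pvLexTail edges visited rest (ap :: rest).length (by simp))
    | cons x xs =>
      have hx : x ∈ (edges.getD ap []).filter (fun w => !(PySem.Set.contains visited w)) := by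
        rw [← List.mem_reverse, hrev]; exact List.mem_cons_self
      have hxU : x ∈ pvU edges := pvMemU_val _ ap x (List.mem_of_mem_filter hx)
      have hxnv : PySem.Set.contains visited x = false := by
        have := List.of_mem_filter hx
        simpa using this
      apply Prod.Lex.right
      apply Prod.Lex.left
      have h0 : pvT edges visited (x :: (xs ++ rest)) = 0 := by
        simp only [pvT]
        rw [if_pos]
        simp only [Bool.and_eq_true]
        refine ⟨by simpa using hxU, by rw [Bool.not_eq_true']; exact hxnv⟩
      simp only [List.cons_append] at h0 ⊢
      omega
  · by_cases hU : ap ∈ pvU edges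
    · exact Prod.Lex.left _ _ (pvUn_add_lt edges visited ap hU hv)
    · have hnil : edges.getD ap [] = [] := pvGetD_nil_of_not_memU edges ap hU
      rw [pvUn_add_eq_of_not_memU edges visited ap hU, hnil]
      have ht : pvT edges visited (ap :: rest) = 1 := by
        simp only [pvT]
        rw [if_neg]
        intro hcon
        rw [Bool.and_eq_true] at hcon
        exact hU (by simpa using hcon.1)
      rw [ht]
      simp only [List.filter_nil, List.reverse_nil, List.nil_append]
      exact Prod.Lex.right _ (pvLexTail edges (PySem.Set.add visited ap) rest (ap :: rest).length (by simp))

-- A's 'for airport in airports:' loop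
def pvLoopA (edges : PySem.Dict String (List String)) :
    List String → PySem.Dict String Int → Int → Int
  | [], _, c => c
  | a :: rest, group, c =>
    if (group.get? a).isSome then pvLoopA edges rest group c
    else pvLoopA edges rest (pvDfsA edges c [a] PySem.Set.empty (group.insert a c)) (c + 1)

def airportConnections (airports : List String) (routes : List (String × String)) (startingAirport : String) : Int :=
  pvLoopA (pvEdgesA routes) airports PySem.Dict.empty 0

-- ===== PORT B =====
-- adj = {}; for start, goal in routes: adj.setdefault(start, []).append(goal)
def pvAdjB (routes : List (String × String)) : PySem.Dict String (List String) :=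
  routes.foldl (fun d r => d.modify r.1 [] (· ++ [r.2])) PySem.Dict.empty

-- inner body: if v not in covered: covered.add(v); nxt.add(v)
def pvUpd (q : PySem.Set String × PySem.Set String) (v : String) :
    PySem.Set String × PySem.Set String :=
  if PySem.Set.contains q.1 v then q else (PySem.Set.add q.1 v, PySem.Set.add q.2 v)

-- one frontier expansion: nxt = set(); for u in frontier: for v in adj.get(u, []): …
def pvStepB (adj : PySem.Dict String (List String)) (covered : PySem.Set String)
    (frontier : PySem.Set String) : PySem.Set String × PySem.Set String :=
  frontier.foldl (fun p u => (adj.getD u []).foldl pvUpd p) (covered, PySem.Set.empty)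

-- fold-over-flatMap view of pvStepB, and facts about the flat fold (cited below and by decreasing_by)
theorem pvFoldFlat {α β γ : Type} (g : γ → β → γ) (f : α → List β) (l : List α) (init : γ) :
    l.foldl (fun p u => (f u).foldl g p) init = (l.flatMap f).foldl g init := by
  induction l generalizing init with
  | nil => rfl
  | cons a t ih => simp only [List.foldl_cons, List.flatMap_cons, List.foldl_append, ih]

theorem pvSc_prefix (l : List String) : ∀ (c ps : PySem.Set String),
    c <+: (l.foldl pvUpd (c, ps)).1 := by
  induction l with
  | nil => intro c ps; exact List.prefix_refl c
  | cons v t ih =>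
    intro c ps
    simp only [List.foldl_cons, pvUpd]
    by_cases hc : PySem.Set.contains c v
    · rw [if_pos hc]; exact ih c ps
    · rw [if_neg hc]
      have hnm : v ∉ c := fun hm => hc ((PySem.Set.contains_iff c v).2 hm)
      rw [PySem.Set.add_of_not_mem hnm]
      exact List.IsPrefix.trans (List.prefix_append c [v]) (ih (c ++ [v]) _)

theorem pvSc_sub2 (l : List String) : ∀ (c ps : PySem.Set String), ∀ x ∈ ps,
    x ∈ (l.foldl pvUpd (c, ps)).2 := by
  induction l with
  | nil => intro c ps x hx; exact hx
  | cons v t ih =>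
    intro c ps x hx
    simp only [List.foldl_cons, pvUpd]
    by_cases hc : PySem.Set.contains c v
    · rw [if_pos hc]; exact ih c ps x hx
    · rw [if_neg hc]
      exact ih _ _ x ((PySem.Set.mem_add ps v x).2 (Or.inl hx))

theorem pvSc_len (l : List String) : ∀ (c ps : PySem.Set String), (∀ x ∈ ps, x ∈ c) →
    (l.foldl pvUpd (c, ps)).1.length + ps.length
      = c.length + (l.foldl pvUpd (c, ps)).2.length := by
  induction l with
  | nil => intro c ps _; rfl
  | cons v t ih =>
    intro c ps hps
    simp only [List.foldl_cons, pvUpd]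
    by_cases hc : PySem.Set.contains c v
    · rw [if_pos hc]; exact ih c ps hps
    · rw [if_neg hc]
      have hnc : v ∉ c := fun hm => hc ((PySem.Set.contains_iff c v).2 hm)
      have hnp : v ∉ ps := fun hm => hnc (hps v hm)
      rw [PySem.Set.add_of_not_mem hnc, PySem.Set.add_of_not_mem hnp]
      have hps' : ∀ x ∈ ps ++ [v], x ∈ c ++ [v] := by
        intro x hx
        rcases List.mem_append.1 hx with h | h
        · exact List.mem_append.2 (Or.inl (hps x h))
        · exact List.mem_append.2 (Or.inr h)
      have := ih (c ++ [v]) (ps ++ [v]) hps'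
      simp only [List.length_append, List.length_cons, List.length_nil] at this ⊢
      omega

theorem pvSc_mem (l : List String) : ∀ (c ps : PySem.Set String), (∀ x ∈ ps, x ∈ c) → ∀ y,
    (y ∈ (l.foldl pvUpd (c, ps)).1 ↔ y ∈ c ∨ y ∈ (l.foldl pvUpd (c, ps)).2) := by
  induction l with
  | nil => intro c ps hps y; exact ⟨Or.inl, fun h => h.elim id (fun h2 => hps y h2)⟩
  | cons v t ih =>
    intro c ps hps y
    simp only [List.foldl_cons, pvUpd]
    by_cases hc : PySem.Set.contains c v
    · rw [if_pos hc]; exact ih c ps hps y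
    · rw [if_neg hc]
      have hps' : ∀ x ∈ PySem.Set.add ps v, x ∈ PySem.Set.add c v := by
        intro x hx
        rcases (PySem.Set.mem_add ps v x).1 hx with h | h
        · exact (PySem.Set.mem_add c v x).2 (Or.inl (hps x h))
        · exact (PySem.Set.mem_add c v x).2 (Or.inr h)
      have hvin : v ∈ (t.foldl pvUpd (PySem.Set.add c v, PySem.Set.add ps v)).2 :=
        pvSc_sub2 t _ _ v ((PySem.Set.mem_add ps v v).2 (Or.inr rfl))
      rw [ih _ _ hps' y]
      constructor
      · rintro (h | h)
        · rcases (PySem.Set.mem_add c v y).1 h with h2 | rfl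
          · exact Or.inl h2
          · exact Or.inr hvin
        · exact Or.inr h
      · rintro (h | h)
        · exact Or.inl ((PySem.Set.mem_add c v y).2 (Or.inl h))
        · exact Or.inr h

theorem pvSc_from (l : List String) : ∀ (c ps : PySem.Set String), ∀ x,
    x ∈ (l.foldl pvUpd (c, ps)).2 → x ∈ ps ∨ (x ∈ l ∧ x ∉ c) := by
  induction l with
  | nil => intro c ps x hx; exact Or.inl hx
  | cons v t ih =>
    intro c ps x hx
    simp only [List.foldl_cons, pvUpd] at hx
    by_cases hc : PySem.Set.contains c v
    · rw [if_pos hc] at hx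
      rcases ih c ps x hx with h | ⟨h1, h2⟩
      · exact Or.inl h
      · exact Or.inr ⟨List.mem_cons_of_mem v h1, h2⟩
    · rw [if_neg hc] at hx
      have hnm : v ∉ c := fun hm => hc ((PySem.Set.contains_iff c v).2 hm)
      rcases ih _ _ x hx with h | ⟨h1, h2⟩
      · rcases (PySem.Set.mem_add ps v x).1 h with h2 | rfl
        · exact Or.inl h2
        · exact Or.inr ⟨List.mem_cons_self, hnm⟩
      · refine Or.inr ⟨List.mem_cons_of_mem v h1,
          fun hm => h2 ((PySem.Set.mem_add c v x).2 (Or.inl hm))⟩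

theorem pvSc_nil_eq (c : PySem.Set String) (l : List String)
    (hps : (l.foldl pvUpd (c, (PySem.Set.empty : PySem.Set String))).2 = []) :
    (l.foldl pvUpd (c, (PySem.Set.empty : PySem.Set String))).1 = c := by
  have hlen := pvSc_len l c PySem.Set.empty (by intro x hx; simp [PySem.Set.empty] at hx)
  rw [hps] at hlen
  simp only [PySem.Set.empty, List.length_nil, Nat.add_zero] at hlen
  exact ((pvSc_prefix l c PySem.Set.empty).eq_of_length hlen.symm).symm

-- B's 'while frontier:' loop
def pvBfsB (adj : PySem.Dict String (List String)) (frontier : PySem.Set String)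
    (covered : PySem.Set String) : PySem.Set String :=
  match frontier with
  | [] => covered
  | u :: rest =>
    pvBfsB adj (pvStepB adj covered (u :: rest)).2 (pvStepB adj covered (u :: rest)).1
termination_by (pvUn adj covered, frontier.length)
decreasing_by
  rw [pvStepB, pvFoldFlat]
  cases h2 : (((u :: rest).flatMap (fun u => adj.getD u [])).foldl pvUpd
      (covered, (PySem.Set.empty : PySem.Set String))).2 with
  | nil =>
    rw [pvSc_nil_eq covered _ h2]
    exact Prod.Lex.right _ (by simp)
  | cons x xs =>
    apply Prod.Lex.left
    have hx2 : x ∈ (((u :: rest).flatMap (fun u => adj.getD u [])).foldl pvUpd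
        (covered, (PySem.Set.empty : PySem.Set String))).2 := by
      rw [h2]; exact List.mem_cons_self
    rcases pvSc_from _ covered PySem.Set.empty x hx2 with h | ⟨hl, hnc⟩
    · simp [PySem.Set.empty] at h
    · rcases List.mem_flatMap.1 hl with ⟨w, _, hw⟩
      have hxU : x ∈ pvU adj := pvMemU_val _ w x hw
      have hx1 : x ∈ (((u :: rest).flatMap (fun u => adj.getD u [])).foldl pvUpd
          (covered, (PySem.Set.empty : PySem.Set String))).1 :=
        (pvSc_mem _ covered PySem.Set.empty (by intro y hy; simp [PySem.Set.empty] at hy) x).2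
          (Or.inr hx2)
      apply pvFilterLenStrict _ _ _ _ x hxU
      · rw [Bool.not_eq_true', pvContains_false]; exact hnc
      · intro h
        rw [Bool.not_eq_true', pvContains_false] at h
        exact h hx1
      · intro y _ hy
        rw [Bool.not_eq_true', pvContains_false] at hy ⊢
        exact fun hm => hy ((pvSc_prefix _ covered PySem.Set.empty).subset hm)

-- B's 'for airport in airports:' loop
def pvLoopB (adj : PySem.Dict String (List String)) :
    List String → PySem.Set String → Int → Int
  | [], _, c => c
  | a :: rest, covered, c =>
    if PySem.Set.contains covered a then pvLoopB adj rest covered c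
    else pvLoopB adj rest (pvBfsB adj [a] (PySem.Set.add covered a)) (c + 1)

def airportConnections_alt (airports : List String) (routes : List (String × String)) (startingAirport : String) : Int :=
  pvLoopB (pvAdjB routes) airports PySem.Set.empty 0

-- ===== PRECONDITION & SPEC =====
def Spec_airportConnections (airports : List String) (routes : List (String × String)) (startingAirport : String) (out : Int) : Prop := out = airportConnections_alt airports routes startingAirport
instance (airports : List String) (routes : List (String × String)) (startingAirport : String) (out : Int) : Decidable (Spec_airportConnections airports routes startingAirport out) := by unfold Spec_airportConnections; infer_instance

-- ===== CLAIM (what is proved, stated in full; the proofs are below) =====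
def Claim_equal_airportConnections : Prop := ∀ (airports : List String) (routes : List (String × String)) (startingAirport : String), Dom_airportConnections airports routes startingAirport → Spec_airportConnections airports routes startingAirport (airportConnections airports routes startingAirport)

-- ===== LEMMAS AND PROOFS =====
theorem pvSc_all (l : List String) : ∀ (c ps : PySem.Set String), ∀ w ∈ l,
    w ∈ (l.foldl pvUpd (c, ps)).1 := by
  induction l with
  | nil => intro c ps w hw; simp at hw
  | cons v t ih =>
    intro c ps w hw
    simp only [List.foldl_cons, pvUpd]
    by_cases hc : PySem.Set.contains c v
    · rw [if_pos hc]
      rcases List.mem_cons.1 hw with rfl | hw2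
      · exact (pvSc_prefix t c ps).subset ((PySem.Set.contains_iff c w).1 hc)
      · exact ih c ps w hw2
    · rw [if_neg hc]
      rcases List.mem_cons.1 hw with rfl | hw2
      · exact (pvSc_prefix t _ _).subset ((PySem.Set.mem_add c w w).2 (Or.inr rfl))
      · exact ih _ _ w hw2

-- one-step edge relation of the routes graph, and reachability
def pvStepR (edges : PySem.Dict String (List String)) (x y : String) : Prop :=
  y ∈ edges.getD x []

def pvReach (edges : PySem.Dict String (List String)) : String → String → Prop :=
  Relation.ReflTransGen (pvStepR edges)

-- A's DFS run marks exactly the already-marked keys plus everything reachable from a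
theorem pvDfsA_keys (edges : PySem.Dict String (List String)) (c : Int) (a : String) :
    ∀ (stack : List String) (visited : PySem.Set String) (group : PySem.Dict String Int),
    (∀ s ∈ stack, pvReach edges a s) →
    (∀ u ∈ visited, ∀ w ∈ edges.getD u [], w ∈ visited ∨ w ∈ stack) →
    (a ∈ visited ∨ a ∈ stack) →
    (∀ s ∈ stack, s ∈ group.keys) →
    (∀ v ∈ visited, v ∈ group.keys) →
    ∀ v, (v ∈ (pvDfsA edges c stack visited group).keys ↔ v ∈ group.keys ∨ pvReach edges a v) := by
  intro stack visited group
  induction stack, visited, group using pvDfsA.induct edges c with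
  | case1 visited group =>
    intro _ h2 h3 _ h5 v
    rw [pvDfsA]
    constructor
    · exact Or.inl
    · rintro (h | hr)
      · exact h
      · have hav : a ∈ visited := h3.elim id (by simp)
        have hvis : v ∈ visited := by
          induction hr with
          | refl => exact hav
          | tail _ hstep ih =>
            rcases h2 _ ih _ hstep with h | h
            · exact h
            · simp at h
        exact h5 v hvis
  | case2 visited group ap rest ih =>
    intro h1 h2 h3 h4 h5 v
    rw [pvDfsA]
    have hReach_ap : pvReach edges a ap := h1 ap List.mem_cons_self
    have hpush : ∀ x ∈ (edges.getD ap []).filter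
        (fun w => !(PySem.Set.contains (PySem.Set.add visited ap) w)),
        pvStepR edges ap x := fun x hx => List.mem_of_mem_filter hx
    have hpushR : ∀ x ∈ (edges.getD ap []).filter
        (fun w => !(PySem.Set.contains (PySem.Set.add visited ap) w)),
        pvReach edges a x := fun x hx => Relation.ReflTransGen.tail hReach_ap (hpush x hx)
    have hkeys' : ∀ w, w ∈ (((edges.getD ap []).filter
          (fun w => !(PySem.Set.contains (PySem.Set.add visited ap) w))).foldl
          (fun g w => g.insert w c) group).keys ↔
        w ∈ group.keys ∨ w ∈ (edges.getD ap []).filter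
          (fun w => !(PySem.Set.contains (PySem.Set.add visited ap) w)) := by
      intro w
      rw [PySem.Dict.keys_foldl_insert _ (fun _ _ => c) group]
      exact PySem.Set.mem_update _ _ w
    rw [ih ?ha1 ?ha2 ?ha3 ?ha4 ?ha5 v]
    case ha1 =>
      intro s hs
      rcases List.mem_append.1 hs with h | h
      · exact hpushR s (List.mem_reverse.1 h)
      · exact h1 s (List.mem_cons_of_mem _ h)
    case ha2 =>
      intro u hu w hw
      rcases (PySem.Set.mem_add visited ap u).1 hu with hu2 | rfl
      · rcases h2 u hu2 w hw with h | h
        · exact Or.inl ((PySem.Set.mem_add visited ap w).2 (Or.inl h))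
        · rcases List.mem_cons.1 h with rfl | h2
          · exact Or.inl ((PySem.Set.mem_add visited w w).2 (Or.inr rfl))
          · exact Or.inr (List.mem_append.2 (Or.inr h2))
      · by_cases hwv : w ∈ PySem.Set.add visited u
        · exact Or.inl hwv
        · refine Or.inr (List.mem_append.2 (Or.inl (List.mem_reverse.2 ?_)))
          refine List.mem_filter.2 ⟨hw, ?_⟩
          rw [Bool.not_eq_eq_eq_not, Bool.not_true, pvContains_false]
          exact hwv
    case ha3 =>
      rcases h3 with h | h
      · exact Or.inl ((PySem.Set.mem_add visited ap a).2 (Or.inl h))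
      · rcases List.mem_cons.1 h with rfl | h2
        · exact Or.inl ((PySem.Set.mem_add visited a a).2 (Or.inr rfl))
        · exact Or.inr (List.mem_append.2 (Or.inr h2))
    case ha4 =>
      intro s hs
      rcases List.mem_append.1 hs with h | h
      · exact (hkeys' s).2 (Or.inr (List.mem_reverse.1 h))
      · exact (hkeys' s).2 (Or.inl (h4 s (List.mem_cons_of_mem _ h)))
    case ha5 =>
      intro w hw
      rcases (PySem.Set.mem_add visited ap w).1 hw with h | rfl
      · exact (hkeys' w).2 (Or.inl (h5 w h))
      · exact (hkeys' w).2 (Or.inl (h4 w List.mem_cons_self))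
    rw [hkeys' v]
    constructor
    · rintro ((h | h) | h)
      · exact Or.inl h
      · exact Or.inr (hpushR v h)
      · exact Or.inr h
    · rintro (h | h)
      · exact Or.inl (Or.inl h)
      · exact Or.inr h

-- B's frontier BFS covers exactly the old covered set plus everything reachable from a
theorem pvBfsB_mem (adj : PySem.Dict String (List String)) (a : String) :
    ∀ (frontier covered : PySem.Set String),
    (∀ s ∈ frontier, pvReach adj a s) →
    (∀ x ∈ covered, x ∈ frontier ∨ ∀ w ∈ adj.getD x [], w ∈ covered) →
    a ∈ covered →
    ∀ v, (v ∈ pvBfsB adj frontier covered ↔ v ∈ covered ∨ pvReach adj a v) := by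
  intro frontier covered
  induction frontier, covered using pvBfsB.induct adj with
  | case1 covered =>
    intro _ g2 g3 v
    rw [pvBfsB]
    constructor
    · exact Or.inl
    · rintro (h | hr)
      · exact h
      · have hvis : v ∈ covered := by
          induction hr with
          | refl => exact g3
          | tail _ hstep ih =>
            rcases g2 _ ih with h | h
            · simp at h
            · exact h _ hstep
        exact hvis
  | case2 covered u rest ih =>
    intro g1 g2 g3 v
    rw [pvBfsB]
    have hemp : ∀ x, x ∈ (PySem.Set.empty : PySem.Set String) → x ∈ covered := by
      intro x hx; simp [PySem.Set.empty] at hx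
    have hflat : pvStepB adj covered (u :: rest)
        = ((u :: rest).flatMap (fun w => adj.getD w [])).foldl pvUpd
            (covered, (PySem.Set.empty : PySem.Set String)) := by
      rw [pvStepB, pvFoldFlat]
    have hmem : ∀ y, y ∈ (pvStepB adj covered (u :: rest)).1 ↔
        y ∈ covered ∨ y ∈ (pvStepB adj covered (u :: rest)).2 := by
      intro y; rw [hflat]; exact pvSc_mem _ covered PySem.Set.empty hemp y
    have hfrom : ∀ x ∈ (pvStepB adj covered (u :: rest)).2,
        x ∈ (u :: rest).flatMap (fun w => adj.getD w []) ∧ x ∉ covered := by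
      intro x hx
      rw [hflat] at hx
      rcases pvSc_from _ covered PySem.Set.empty x hx with h | h
      · simp [PySem.Set.empty] at h
      · exact h
    have hall : ∀ w ∈ (u :: rest).flatMap (fun z => adj.getD z []),
        w ∈ (pvStepB adj covered (u :: rest)).1 := by
      intro w hw; rw [hflat]; exact pvSc_all _ covered PySem.Set.empty w hw
    have hpushR : ∀ x ∈ (pvStepB adj covered (u :: rest)).2, pvReach adj a x := by
      intro x hx
      rcases List.mem_flatMap.1 (hfrom x hx).1 with ⟨w, hwf, hwx⟩
      exact Relation.ReflTransGen.tail (g1 w hwf) hwx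
    rw [ih ?hb1 ?hb2 ?hb3 v]
    case hb1 => exact hpushR
    case hb2 =>
      intro x hx
      rcases (hmem x).1 hx with h | h
      · rcases g2 x h with h2 | h2
        · refine Or.inr (fun w hw => hall w ?_)
          exact List.mem_flatMap.2 ⟨x, h2, hw⟩
        · exact Or.inr (fun w hw => (hmem w).2 (Or.inl (h2 w hw)))
      · exact Or.inl h
    case hb3 => exact (hmem a).2 (Or.inl g3)
    constructor
    · rintro (h | h)
      · rcases (hmem v).1 h with h2 | h2
        · exact Or.inl h2
        · exact Or.inr (hpushR v h2)
      · exact Or.inr h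
    · rintro (h | h)
      · exact Or.inl ((hmem v).2 (Or.inl h))
      · exact Or.inr h

theorem pvLoop_eq (edges : PySem.Dict String (List String)) :
    ∀ (airports : List String) (group : PySem.Dict String Int) (covered : PySem.Set String) (c : Int),
    (∀ v, v ∈ group.keys ↔ v ∈ covered) →
    (∀ v ∈ covered, ∀ w ∈ edges.getD v [], w ∈ covered) →
    pvLoopA edges airports group c = pvLoopB edges airports covered c := by
  intro airports
  induction airports with
  | nil => intro group covered c _ _; rfl
  | cons a rest ih =>
    intro group covered c e1 e2
    rw [pvLoopA, pvLoopB]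
    have hsome : (group.get? a).isSome = PySem.Set.contains covered a := by
      rw [← PySem.Dict.contains_eq_isSome_get?]
      by_cases h : a ∈ covered
      · rw [(PySem.Set.contains_iff covered a).2 h, (PySem.Dict.contains_iff_mem_keys group a).2 ((e1 a).2 h)]
      · rw [(pvContains_false covered a).2 h]
        rw [Bool.eq_false_iff]
        exact fun hc => h ((e1 a).1 ((PySem.Dict.contains_iff_mem_keys group a).1 hc))
    rw [hsome]
    by_cases hc : PySem.Set.contains covered a = true
    · rw [if_pos hc, if_pos hc]
      exact ih group covered c e1 e2
    · rw [if_neg hc, if_neg hc]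
      have hmem : a ∉ covered := fun h => hc ((PySem.Set.contains_iff covered a).2 h)
      have hA := pvDfsA_keys edges c a [a] PySem.Set.empty (group.insert a c)
        (by intro s hs
            simp only [List.mem_singleton] at hs
            subst hs
            exact Relation.ReflTransGen.refl)
        (by intro u hu; simp [PySem.Set.empty] at hu)
        (Or.inr List.mem_cons_self)
        (by intro s hs
            simp only [List.mem_singleton] at hs
            subst hs
            exact (PySem.Dict.mem_keys_insert group _ _ c).2 (Or.inl rfl))
        (by intro w hw; simp [PySem.Set.empty] at hw)
      have hB := pvBfsB_mem edges a [a] (PySem.Set.add covered a)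
        (by intro s hs
            simp only [List.mem_singleton] at hs
            subst hs
            exact Relation.ReflTransGen.refl)
        (by intro x hx
            rcases (PySem.Set.mem_add covered a x).1 hx with h | h
            · exact Or.inr (fun w hw => (PySem.Set.mem_add covered a w).2 (Or.inl (e2 x h w hw)))
            · subst h
              exact Or.inl List.mem_cons_self)
        ((PySem.Set.mem_add covered a a).2 (Or.inr rfl))
      apply ih
      · intro v
        rw [hA v, hB v]
        rw [PySem.Dict.mem_keys_insert group a v c, (PySem.Set.mem_add covered a v)]
        constructor
        · rintro ((rfl | h) | h)
          · exact Or.inr Relation.ReflTransGen.refl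
          · exact Or.inl (Or.inl ((e1 v).1 h))
          · exact Or.inr h
        · rintro ((h | rfl) | h)
          · exact Or.inl (Or.inr ((e1 v).2 h))
          · exact Or.inl (Or.inl rfl)
          · exact Or.inr h
      · intro v hv w hw
        rcases (hB v).1 hv with h | h
        · rcases (PySem.Set.mem_add covered a v).1 h with h2 | h2
          · exact (hB w).2 (Or.inl ((PySem.Set.mem_add covered a w).2 (Or.inl (e2 v h2 w hw))))
          · subst h2
            exact (hB w).2 (Or.inr (Relation.ReflTransGen.tail Relation.ReflTransGen.refl hw))
        · exact (hB w).2 (Or.inr (Relation.ReflTransGen.tail h hw))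

-- ===== VERDICT (by name: the statement is the Claim_ definition above) =====
theorem airportConnections_spec : Claim_equal_airportConnections := by
  intro airports routes startingAirport _
  unfold Spec_airportConnections airportConnections airportConnections_alt
  have h : pvAdjB routes = pvEdgesA routes := rfl
  rw [h]
  apply pvLoop_eq
  · intro v
    rw [PySem.Dict.keys_empty]
    simp [PySem.Set.empty]
  · intro v hv
    simp [PySem.Set.empty] at hv
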